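-- pv_equiv track=rewrite | github.com/deker104/voter-bot | graph.py | _irv_elimination_order
-- ===== SOURCE A (Python) =====
-- from typing import Dict, List, Sequence, Tuple, Optional
--
-- def _irv_elimination_order(
--     ballots: Sequence[Sequence[int]],
--     candidate_ids: Sequence[int],
-- ) -> Tuple[int, List[int]]:
--     """
--     Возвращает (winner_id, eliminated_in_order)
--     eliminated_in_order: кандидаты в порядке выбывания (первый = худший, последний = почти победитель).
--     Тайбрейк при равенстве: минимальный id (детерминированно).
--     """
--     active = set(candidate_ids)
--     eliminated: List[int] = []
--
--     while len(active) > 1: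
--         counts = {cid: 0 for cid in active}
--
--         # считаем первые активные предпочтения
--         for ballot in ballots:
--             chosen = None
--             for pref in ballot:
--                 if pref in active:
--                     chosen = pref
--                     break
--             if chosen is not None:
--                 counts[chosen] += 1
--
--         # выбывает тот, у кого минимум голосов (tie -> min id)
--         min_votes = min(counts.values())
--         losers = [cid for cid, v in counts.items() if v == min_votes]
--         out = min(losers)
--
--         active.remove(out)
--         eliminated.append(out)
--
--     winner = next(iter(active))
--     return winner, eliminated
-- ===== SOURCE B (Python) =====
-- from typing import List, Sequence, Tuple
--
--
-- def _skip_inactive(prefs, active):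
--     i = 0
--     while i < len(prefs) and prefs[i] not in active:
--         i += 1
--     return prefs[i:]
--
--
-- def _irv_elimination_order(
--     ballots: Sequence[Sequence[int]],
--     candidate_ids: Sequence[int],
-- ) -> Tuple[int, List[int]]:
--     active = set(candidate_ids)
--     eliminated: List[int] = []
--
--     # advance every ballot to its first active preference once; keep only
--     # the non-exhausted suffixes, and re-advance a suffix only when the
--     # candidate it currently counts for is eliminated
--     rests = []
--     for b in ballots:
--         r = _skip_inactive(list(b), active)
--         if r:
--             rests.append(r)
--
--     while len(active) > 1:
--         counts = {}
--         for r in rests: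
--             counts[r[0]] = counts.get(r[0], 0) + 1
--         loser = min(active, key=lambda c: (counts.get(c, 0), c))
--         active.remove(loser)
--         eliminated.append(loser)
--         new_rests = []
--         for r in rests:
--             if r[0] == loser:
--                 r = _skip_inactive(r[1:], active)
--             if r:
--                 new_rests.append(r)
--         rests = new_rests
--
--     winner = next(iter(active))
--     return winner, eliminated
-- ===== Notes on version B (the rewrite author's own statement) =====
-- stated objective: alternative
-- what changed: Instead of rescanning every full ballot against the active set in every elimination round and then taking min-votes/filter/min-id over a dict, B advances each ballot once to its first active preference, keeps only these suffixes, re-advances a suffix only when the candidate it currently counts for is eliminated, and picks the loser as a single lexicographic (votes, id) minimum.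
import Mathlib
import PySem

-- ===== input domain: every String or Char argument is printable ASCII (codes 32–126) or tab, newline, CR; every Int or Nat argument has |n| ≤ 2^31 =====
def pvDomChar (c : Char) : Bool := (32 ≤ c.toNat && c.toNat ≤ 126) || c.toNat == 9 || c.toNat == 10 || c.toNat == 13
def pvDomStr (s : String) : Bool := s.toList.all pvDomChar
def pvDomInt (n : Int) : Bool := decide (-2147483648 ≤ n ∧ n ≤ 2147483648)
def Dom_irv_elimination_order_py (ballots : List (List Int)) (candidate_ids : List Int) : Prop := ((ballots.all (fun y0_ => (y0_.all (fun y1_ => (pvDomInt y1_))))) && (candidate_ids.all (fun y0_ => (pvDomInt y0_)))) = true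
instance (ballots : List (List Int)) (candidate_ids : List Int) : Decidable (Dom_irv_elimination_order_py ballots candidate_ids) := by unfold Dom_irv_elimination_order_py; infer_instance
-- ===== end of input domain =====

-- B replaces A's per-round rescan of every ballot by once-advanced ballot suffixes
-- (re-advanced only when their current head is eliminated) and a lexicographic
-- (votes, id) minimum; equivalence of the RETURN values is proved on nonempty
-- candidate lists (on an empty one Python A raises StopIteration).

-- ===== PORT A =====
-- inner 'for pref in ballot: if pref in active: chosen = pref; break'
def pvFirstChoice (active : PySem.Set Int) : List Int → Option Int
  | [] => none
  | p :: rest => if PySem.Set.contains active p then some p else pvFirstChoice active rest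

-- 'counts = {cid: 0 for cid in active}' then the counting loop over ballots
def pvCountsA (ballots : List (List Int)) (active : PySem.Set Int) : PySem.Dict Int Int :=
  ballots.foldl
    (fun counts ballot =>
      match pvFirstChoice active ballot with
      | some chosen => counts.modify chosen 0 (fun v => v + 1)
      | none => counts)
    (active.foldl (fun d cid => d.insert cid (0 : Int)) PySem.Dict.empty)

-- one loop body: min votes, losers, min id (.getD 0 only makes the mins total:
-- counts is nonempty whenever len(active) > 1, so both min? are some)
def pvRoundA (ballots : List (List Int)) (active : PySem.Set Int) : Int :=
  (PySem.List.min?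
    (((pvCountsA ballots active).items.filter
        (fun cv => cv.2 == (PySem.List.min? (pvCountsA ballots active).values (fun v => v)).getD 0)).map
      (fun cv => cv.1))
    (fun c => c)).getD 0

-- the 'while len(active) > 1' loop; fuel (the initial set size) only makes it
-- total: each pass removes a member, so the guard fails before fuel runs out
def pvLoopA (ballots : List (List Int)) : Nat → PySem.Set Int → List Int → PySem.Set Int × List Int
  | 0, active, eliminated => (active, eliminated)
  | fuel + 1, active, eliminated =>
    if 1 < PySem.Set.len active then
      pvLoopA ballots fuel (PySem.Set.discard active (pvRoundA ballots active))
        (eliminated ++ [pvRoundA ballots active])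
    else (active, eliminated)

def irv_elimination_order_py (ballots : List (List Int)) (candidate_ids : List Int) : Int × List Int :=
  ((pvLoopA ballots (PySem.Set.len (PySem.Set.ofList candidate_ids)).toNat
      (PySem.Set.ofList candidate_ids) []).1.headD 0,
   (pvLoopA ballots (PySem.Set.len (PySem.Set.ofList candidate_ids)).toNat
      (PySem.Set.ofList candidate_ids) []).2)

-- ===== PORT B =====
-- '_skip_inactive(prefs, active)' (index loop + final slice, as a suffix)
def pvSkipInactive (active : PySem.Set Int) : List Int → List Int
  | [] => []
  | p :: rest => if PySem.Set.contains active p then p :: rest else pvSkipInactive active rest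

-- 'for b in ballots: r = _skip_inactive(b, active); if r: rests.append(r)'
def pvInitRests (ballots : List (List Int)) (active : PySem.Set Int) : List (List Int) :=
  ballots.foldl
    (fun acc b =>
      if !(pvSkipInactive active b).isEmpty then acc ++ [pvSkipInactive active b] else acc) []

-- 'counts = {}; for r in rests: counts[r[0]] = counts.get(r[0], 0) + 1'
-- (rests holds nonempty suffixes, so r[0] is their head; headD 0 only totalises)
def pvCountsB (rests : List (List Int)) : PySem.Dict Int Int :=
  rests.foldl (fun d r => d.insert (r.headD 0) (d.getD (r.headD 0) 0 + 1)) PySem.Dict.empty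

-- 'loser = min(active, key=lambda c: (counts.get(c, 0), c))'
def pvLoserB (active : PySem.Set Int) (rests : List (List Int)) : Int :=
  (PySem.List.min2? active (fun c => (pvCountsB rests).getD c 0) (fun c => c)).getD 0

-- the new_rests loop: re-advance exactly the suffixes that counted for loser
def pvAdvance (loser : Int) (active : PySem.Set Int) (rests : List (List Int)) : List (List Int) :=
  rests.foldl
    (fun acc r =>
      if !((if r.headD 0 == loser then pvSkipInactive active (r.drop 1) else r)).isEmpty
      then acc ++ [if r.headD 0 == loser then pvSkipInactive active (r.drop 1) else r]
      else acc) []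

-- B's 'while len(active) > 1' loop, carrying the suffixes; same fuel device
def pvLoopB : Nat → PySem.Set Int → List (List Int) → List Int → PySem.Set Int × List Int
  | 0, active, _, eliminated => (active, eliminated)
  | fuel + 1, active, rests, eliminated =>
    if 1 < PySem.Set.len active then
      pvLoopB fuel (PySem.Set.discard active (pvLoserB active rests))
        (pvAdvance (pvLoserB active rests) (PySem.Set.discard active (pvLoserB active rests)) rests)
        (eliminated ++ [pvLoserB active rests])
    else (active, eliminated)

def irv_elimination_order_py_alt (ballots : List (List Int)) (candidate_ids : List Int) : Int × List Int :=
  ((pvLoopB (PySem.Set.len (PySem.Set.ofList candidate_ids)).toNat (PySem.Set.ofList candidate_ids)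
      (pvInitRests ballots (PySem.Set.ofList candidate_ids)) []).1.headD 0,
   (pvLoopB (PySem.Set.len (PySem.Set.ofList candidate_ids)).toNat (PySem.Set.ofList candidate_ids)
      (pvInitRests ballots (PySem.Set.ofList candidate_ids)) []).2)

-- ===== PRECONDITION & SPEC =====
-- Pre_ excludes only the empty candidate list, on which Python A (and B alike)
-- raises StopIteration at 'next(iter(active))'.
def Pre_irv_elimination_order_py (ballots : List (List Int)) (candidate_ids : List Int) : Prop :=
  candidate_ids ≠ []
instance (ballots : List (List Int)) (candidate_ids : List Int) : Decidable (Pre_irv_elimination_order_py ballots candidate_ids) := by unfold Pre_irv_elimination_order_py; infer_instance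
def pvWitness_irv_elimination_order_py : List (List Int) × List Int := ([[1, 2], [2]], [1, 2])

def Spec_irv_elimination_order_py (ballots : List (List Int)) (candidate_ids : List Int) (out : Int × List Int) : Prop := out = irv_elimination_order_py_alt ballots candidate_ids
instance (ballots : List (List Int)) (candidate_ids : List Int) (out : Int × List Int) : Decidable (Spec_irv_elimination_order_py ballots candidate_ids out) := by unfold Spec_irv_elimination_order_py; infer_instance

-- ===== CLAIM (what is proved, stated in full; the proofs are below) =====
def Claim_equal_irv_elimination_order_py : Prop := ∀ (ballots : List (List Int)) (candidate_ids : List Int), Dom_irv_elimination_order_py ballots candidate_ids → Pre_irv_elimination_order_py ballots candidate_ids → Spec_irv_elimination_order_py ballots candidate_ids (irv_elimination_order_py ballots candidate_ids)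

-- ===== LEMMAS AND PROOFS =====

-- number of ballots whose first active preference is c (A's count for c)
def pvTally (ballots : List (List Int)) (S : PySem.Set Int) (c : Int) : Int :=
  ((ballots.countP (fun b => pvFirstChoice S b == some c) : Nat) : Int)

-- (votes, id)-lexicographic comparison and minimum
def pvLexLe (t : Int → Int) (x c : Int) : Prop := t x < t c ∨ (t x = t c ∧ x ≤ c)

def pvIsLexMin (S : List Int) (t : Int → Int) (x : Int) : Prop :=
  x ∈ S ∧ ∀ c ∈ S, pvLexLe t x c

theorem pvIsLexMin_unique {S : List Int} {t : Int → Int} {x y : Int}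
    (hx : pvIsLexMin S t x) (hy : pvIsLexMin S t y) : x = y := by
  obtain ⟨hxm, hxall⟩ := hx
  obtain ⟨hym, hyall⟩ := hy
  have h1 := hxall y hym
  have h2 := hyall x hxm
  unfold pvLexLe at h1 h2
  omega

theorem pvSet_contains_iff (S : PySem.Set Int) (x : Int) :
    PySem.Set.contains S x = true ↔ x ∈ S := by
  simp [PySem.Set.contains]

theorem pvFirstChoice_mem {S : PySem.Set Int} {b : List Int} {c : Int}
    (h : pvFirstChoice S b = some c) : c ∈ S := by
  induction b with
  | nil => simp [pvFirstChoice] at h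
  | cons p rest ih =>
    rw [pvFirstChoice] at h
    by_cases hp : PySem.Set.contains S p = true
    · rw [if_pos hp] at h
      obtain rfl : p = c := by simpa using h
      exact (pvSet_contains_iff S p).mp hp
    · rw [if_neg hp] at h
      exact ih h

theorem pvFirstChoice_eq_head_skip (S : PySem.Set Int) (b : List Int) :
    pvFirstChoice S b = (pvSkipInactive S b).head? := by
  induction b with
  | nil => rfl
  | cons p rest ih =>
    rw [pvFirstChoice, pvSkipInactive]
    by_cases hp : PySem.Set.contains S p = true
    · rw [if_pos hp, if_pos hp]; rfl
    · rw [if_neg hp, if_neg hp]; exact ih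

theorem pvSkip_head_mem {S : PySem.Set Int} {b : List Int} {p : Int} {tl : List Int}
    (h : pvSkipInactive S b = p :: tl) : p ∈ S := by
  have h' : pvFirstChoice S b = some p := by
    rw [pvFirstChoice_eq_head_skip, h]; rfl
  exact pvFirstChoice_mem h'

theorem pvSkip_skip {S S' : PySem.Set Int}
    (hsub : ∀ x, x ∈ S' → x ∈ S) (b : List Int) :
    pvSkipInactive S' (pvSkipInactive S b) = pvSkipInactive S' b := by
  induction b with
  | nil => rfl
  | cons p rest ih =>
    by_cases hp : PySem.Set.contains S p = true
    · rw [pvSkipInactive, if_pos hp]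
    · have hp' : ¬ PySem.Set.contains S' p = true := by
        intro h
        exact hp ((pvSet_contains_iff S p).mpr (hsub p ((pvSet_contains_iff S' p).mp h)))
    -- skip S (p::rest) = skip S rest; skip S' (p::rest) = skip S' rest
      rw [pvSkipInactive, if_neg hp, ih, pvSkipInactive, if_neg hp']

theorem pvSet_update_of_subset (l : List Int) (s : PySem.Set Int)
    (h : ∀ x ∈ l, x ∈ s) : PySem.Set.update s l = s := by
  induction l generalizing s with
  | nil => rfl
  | cons a tl ih =>
    have ha : PySem.Set.contains s a = true := (pvSet_contains_iff s a).mpr (h a (by simp))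
    show List.foldl PySem.Set.add (PySem.Set.add s a) tl = s
    have h2 : PySem.Set.add s a = s := by rw [PySem.Set.add, if_pos ha]
    rw [h2]
    exact ih s (fun x hx => h x (by simp [hx]))

theorem pvCount_filterMap {α β : Type} [BEq α] [LawfulBEq α] [DecidableEq β]
    (f : α → Option β) (l : List α) (c : β) :
    (l.filterMap f).count c = l.countP (fun a => f a == some c) := by
  induction l with
  | nil => rfl
  | cons a tl ih =>
    cases hfa : f a with
    | none => simp [hfa, ih]
    | some b =>
      by_cases hb : b = c
      · subst hb; simp [hfa, ih]
      · simp [hfa, ih, hb]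

theorem pvFoldl_match_first (S : PySem.Set Int) (l : List (List Int)) (d : PySem.Dict Int Int) :
    l.foldl
      (fun counts ballot =>
        match pvFirstChoice S ballot with
        | some chosen => counts.modify chosen 0 (fun v => v + 1)
        | none => counts) d
    = (l.filterMap (pvFirstChoice S)).foldl (fun d x => d.modify x 0 (fun v => v + 1)) d := by
  induction l generalizing d with
  | nil => rfl
  | cons b tl ih =>
    cases hfc : pvFirstChoice S b with
    | none => simp [hfc, ih]
    | some c => simp [hfc, ih]

-- characterisation of A's counts dict
theorem pvCountsA_items (ballots : List (List Int)) (S : PySem.Set Int) (hS : S.Nodup) :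
    (pvCountsA ballots S).items = S.map (fun c => (c, pvTally ballots S c)) := by
  unfold pvCountsA
  rw [pvFoldl_match_first]
  set chosen := ballots.filterMap (pvFirstChoice S) with hchosen
  set d0 := S.foldl (fun d cid => d.insert cid (0 : Int)) PySem.Dict.empty with hd0def
  have hd0 : d0.items = S.map (fun c => (c, (0 : Int))) := by
    have := PySem.Dict.items_foldl_insert_fresh S (fun c => c) (fun _ => (0 : Int))
      (PySem.Dict.empty (κ := Int) (ν := Int)) (by simp) (by simpa using hS)
    simpa using this
  have hk0 : d0.keys = S := by
    show d0.items.map (fun p => p.1) = S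
    rw [hd0, List.map_map]; simp [Function.comp_def]
  have hchosen_sub : ∀ x ∈ chosen, x ∈ S := by
    intro x hx
    rw [hchosen] at hx
    obtain ⟨b, _, hb⟩ := List.mem_filterMap.mp hx
    exact pvFirstChoice_mem hb
  have hkeys : (chosen.foldl (fun d x => d.modify x 0 (fun v => v + 1)) d0).keys = S := by
    rw [PySem.Dict.keys_foldl_modify, hk0]
    exact pvSet_update_of_subset chosen S hchosen_sub
  have hnd : (chosen.foldl (fun d x => d.modify x 0 (fun v => v + 1)) d0).keys.Nodup := by
    rw [hkeys]; exact hS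
  rw [PySem.Dict.items_eq_map_keys _ hnd 0, hkeys]
  apply List.map_congr_left
  intro c hc
  have hgd : (chosen.foldl (fun d x => d.modify x 0 (fun v => v + 1)) d0).getD c 0
      = d0.getD c 0 + (chosen.count c : Int) := by
    exact PySem.Dict.getD_foldl_modify_add_one chosen d0 c
  have hd0g : d0.getD c 0 = 0 := by
    have hmem : (c, (0 : Int)) ∈ d0.items := by
      rw [hd0]; exact List.mem_map.mpr ⟨c, hc, rfl⟩
    exact PySem.Dict.getD_of_mem_items _ hmem (by rw [hk0]; exact hS) 0
  have hcount : chosen.count c = ballots.countP (fun b => pvFirstChoice S b == some c) := by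
    rw [hchosen]; exact pvCount_filterMap _ _ _
  rw [hgd, hd0g, hcount]
  simp [pvTally]

-- B's counts lookup is the head count of the suffix list
theorem pvCountsB_getD (rests : List (List Int)) (c : Int) :
    (pvCountsB rests).getD c 0 = ((rests.map (fun r => r.headD 0)).count c : Int) := by
  unfold pvCountsB
  rw [← List.foldl_map (f := fun r : List Int => r.headD 0)
      (g := fun (d : PySem.Dict Int Int) (x : Int) => d.insert x (d.getD x 0 + 1))]
  rw [PySem.Dict.getD_foldl_insert_add_one]
  simp

theorem pvFoldl_option_isSome {α : Type} (f : Option α → α → Option α)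
    (hf : ∀ m x, (f (some m) x).isSome = true) :
    ∀ (l : List α) (m : α), (l.foldl f (some m)).isSome = true := by
  intro l
  induction l with
  | nil => intro m; rfl
  | cons a tl ih =>
    intro m
    rw [List.foldl_cons]
    obtain ⟨y, hy⟩ := Option.isSome_iff_exists.mp (hf m a)
    rw [hy]
    exact ih y

theorem pvMin?_cons_exists {α κ : Type} [LT κ] [DecidableLT κ] (key : α → κ) (a : α) (l : List α) :
    ∃ m, PySem.List.min? (a :: l) key = some m := by
  rw [PySem.List.min?, List.foldl_cons, ← Option.isSome_iff_exists]
  exact pvFoldl_option_isSome _ (by intro m x; dsimp only; split <;> rfl) l a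

-- A's min-votes / losers / min-id chain picks the (votes, id)-lexicographic minimum
theorem pvRoundA_isLexMin (ballots : List (List Int)) (S : PySem.Set Int)
    (hS : S.Nodup) (hne : S ≠ []) :
    pvIsLexMin S (pvTally ballots S) (pvRoundA ballots S) := by
  unfold pvRoundA
  set t := pvTally ballots S with ht
  have hitems : (pvCountsA ballots S).items = S.map (fun c => (c, t c)) :=
    pvCountsA_items ballots S hS
  have hvals : (pvCountsA ballots S).values = S.map t := by
    show (pvCountsA ballots S).items.map (fun p => p.2) = S.map t
    rw [hitems]; simp
  rw [hvals]
  have hm : ∃ m, PySem.List.min? (S.map t) (fun v => v) = some m := by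
    cases hSc : S with
    | nil => exact absurd hSc hne
    | cons a tlS => rw [List.map_cons]; exact pvMin?_cons_exists _ _ _
  obtain ⟨m, hmin⟩ := hm
  rw [hmin]
  have hmmem := PySem.List.min?_mem hmin
  have hmle := PySem.List.min?_isMin hmin
  obtain ⟨c0, hc0S, hc0⟩ := List.mem_map.mp hmmem
  have hlosers : ((pvCountsA ballots S).items.filter
      (fun cv => cv.2 == (some m).getD 0)).map (fun cv => cv.1)
      = S.filter (fun c => t c == m) := by
    rw [hitems, List.filter_map, List.map_map]
    simp [Function.comp_def]
  rw [hlosers]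
  have hc0mem : c0 ∈ S.filter (fun c => t c == m) :=
    List.mem_filter.mpr ⟨hc0S, by simp [hc0]⟩
  have hlne : S.filter (fun c => t c == m) ≠ [] := by
    intro h; rw [h] at hc0mem; simp at hc0mem
  have hout : ∃ o, PySem.List.min? (S.filter (fun c => t c == m)) (fun c => c) = some o := by
    cases hfc : S.filter (fun c => t c == m) with
    | nil => exact absurd hfc hlne
    | cons a tlf => exact pvMin?_cons_exists _ _ _
  obtain ⟨o, ho⟩ := hout
  rw [ho]
  simp only [Option.getD_some]
  have homem := PySem.List.min?_mem ho
  have hole := PySem.List.min?_isMin ho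
  obtain ⟨hoS, hot⟩ := List.mem_filter.mp homem
  have hotm : t o = m := by simpa using hot
  constructor
  · exact hoS
  · intro c hcS
    have hmc : m ≤ t c := hmle (t c) (List.mem_map.mpr ⟨c, hcS, rfl⟩)
    by_cases hcm : t c = m
    · right
      refine ⟨by omega, ?_⟩
      have : c ∈ S.filter (fun c => t c == m) :=
        List.mem_filter.mpr ⟨hcS, by simp [hcm]⟩
      simpa using hole c this
    · left; omega

-- python's min(xs, key=lambda c: (k1(c), c)) step function
def pvMin2Step (t : Int → Int) (acc : Option Int) (x : Int) : Option Int :=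
  match acc with
  | none => some x
  | some m =>
    if (decide (t x < t m) || !decide (t m < t x) && decide (x < m)) = true
    then some x else some m

theorem pvMin2_go (t : Int → Int) (l : List Int) : ∀ (m : Int),
    ∃ r, l.foldl (pvMin2Step t) (some m) = some r ∧ (r = m ∨ r ∈ l) ∧
      pvLexLe t r m ∧ ∀ c ∈ l, pvLexLe t r c := by
  induction l with
  | nil =>
    intro m
    exact ⟨m, rfl, Or.inl rfl, Or.inr ⟨rfl, le_refl m⟩, by simp⟩
  | cons x tl ih =>
    intro m
    rw [List.foldl_cons]
    by_cases hc : (decide (t x < t m) || !decide (t m < t x) && decide (x < m)) = true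
    · have hstep : pvMin2Step t (some m) x = some x := by rw [pvMin2Step, if_pos hc]
      rw [hstep]
      obtain ⟨r, h1, h2, h3, h4⟩ := ih x
      simp only [Bool.or_eq_true, Bool.and_eq_true, Bool.not_eq_true', decide_eq_true_eq,
        decide_eq_false_iff_not] at hc
      have hxm : pvLexLe t x m := by unfold pvLexLe; omega
      refine ⟨r, h1, ?_, ?_, ?_⟩
      · rcases h2 with rfl | h2
        · exact Or.inr (by simp)
        · exact Or.inr (by simp [h2])
      · unfold pvLexLe at h3 hxm ⊢; omega
      · intro c hcm
        rcases List.mem_cons.mp hcm with rfl | hcm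
        · exact h3
        · exact h4 c hcm
    · have hstep : pvMin2Step t (some m) x = some m := by rw [pvMin2Step, if_neg hc]
      rw [hstep]
      obtain ⟨r, h1, h2, h3, h4⟩ := ih m
      simp only [Bool.or_eq_true, Bool.and_eq_true, Bool.not_eq_true', decide_eq_true_eq,
        decide_eq_false_iff_not] at hc
      have hmx : pvLexLe t m x := by unfold pvLexLe; omega
      refine ⟨r, h1, ?_, h3, ?_⟩
      · rcases h2 with rfl | h2
        · exact Or.inl rfl
        · exact Or.inr (by simp [h2])
      · intro c hcm
        rcases List.mem_cons.mp hcm with rfl | hcm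
        · unfold pvLexLe at h3 hmx ⊢; omega
        · exact h4 c hcm

theorem pvMin2_isLexMin (S : List Int) (t : Int → Int) (hne : S ≠ []) :
    pvIsLexMin S t ((PySem.List.min2? S t (fun c => c)).getD 0) := by
  cases S with
  | nil => exact absurd rfl hne
  | cons x tl =>
    have hrw : PySem.List.min2? (x :: tl) t (fun c => c) = tl.foldl (pvMin2Step t) (some x) := by
      rw [PySem.List.min2?, List.foldl_cons]
      first
        | rfl
        | (congr 1 <;> first | rfl | (funext acc y; cases acc <;> rfl))
    rw [hrw]
    obtain ⟨r, h1, h2, h3, h4⟩ := pvMin2_go t tl x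
    rw [h1]
    constructor
    · rcases h2 with rfl | h2
      · simp
      · simp [h2]
    · intro c hc
      rcases List.mem_cons.mp hc with rfl | hc
      · exact h3
      · exact h4 c hc

-- the suffix list B maintains, stated against the original ballots
theorem pvInitRests_eq (ballots : List (List Int)) (S : PySem.Set Int) :
    pvInitRests ballots S
      = (ballots.map (pvSkipInactive S)).filter (fun r => !r.isEmpty) := by
  unfold pvInitRests
  rw [PySem.List.foldl_append_if (p := fun b => !(pvSkipInactive S b).isEmpty)
      (f := fun b => pvSkipInactive S b)]
  rw [List.filter_map]
  rfl

theorem pvTally_eq_heads (ballots : List (List Int)) (S : PySem.Set Int) (c : Int) :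
    ((((ballots.map (pvSkipInactive S)).filter (fun r => !r.isEmpty)).map
        (fun r => r.headD 0)).count c : Int)
      = pvTally ballots S c := by
  unfold pvTally
  congr 1
  simp only [List.count_eq_countP, List.countP_map, List.countP_filter]
  apply List.countP_congr
  intro b _
  simp only [Function.comp]
  rw [pvFirstChoice_eq_head_skip]
  cases hsk : pvSkipInactive S b with
  | nil => simp
  | cons p tl =>
    simp only [List.headD_cons, List.head?_cons, List.isEmpty_cons, Bool.not_false,
      Bool.and_true]
    cases hpc : p == c <;> cases hcp : c == p <;>
      simp_all [beq_iff_eq]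

-- in B's update, advancing past the loser is exactly re-skipping for the shrunk set
theorem pvSkip_discard (S : PySem.Set Int) (loser : Int) (b : List Int) :
    pvSkipInactive (PySem.Set.discard S loser) b
      = (if (pvSkipInactive S b).headD 0 == loser
         then pvSkipInactive (PySem.Set.discard S loser) ((pvSkipInactive S b).drop 1)
         else pvSkipInactive S b) := by
  have hsub : ∀ x, x ∈ PySem.Set.discard S loser → x ∈ S := by
    intro x hx
    rw [PySem.Set.discard] at hx
    exact (List.mem_filter.mp hx).1
  have hss := pvSkip_skip hsub b
  cases hsk : pvSkipInactive S b with
  | nil =>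
    rw [← hss, hsk]
    cases h0 : ((0 : Int) == loser) <;> simp [pvSkipInactive]
  | cons p tl =>
    have hpS : p ∈ S := pvSkip_head_mem hsk
    rw [← hss, hsk]
    by_cases hpl : p = loser
    · have hnp : ¬ PySem.Set.contains (PySem.Set.discard S loser) p = true := by
        rw [pvSet_contains_iff, PySem.Set.discard]
        intro h
        have := (List.mem_filter.mp h).2
        simp [hpl] at this
      rw [pvSkipInactive, if_neg hnp]
      simp [hpl]
    · have hp : PySem.Set.contains (PySem.Set.discard S loser) p = true := by
        rw [pvSet_contains_iff, PySem.Set.discard]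
        exact List.mem_filter.mpr ⟨hpS, by simp [hpl]⟩
      rw [pvSkipInactive, if_pos hp]
      simp [hpl]

theorem pvFilter_map_filter (s : List Int → List Int) (h0 : s [] = []) (l : List (List Int)) :
    ((l.filter (fun r => !r.isEmpty)).filter (fun r => !(s r).isEmpty)).map s
      = ((l.map s).filter (fun r => !r.isEmpty)) := by
  induction l with
  | nil => rfl
  | cons a tl ih =>
    cases ha : a with
    | nil => simpa [h0] using ih
    | cons p ptl =>
      by_cases hsa : (s (p :: ptl)).isEmpty
      · simpa [hsa] using ih
      · simpa [hsa] using ih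

-- advancing only the loser's suffixes reproduces the suffix list for the shrunk set
theorem pvRests_step (ballots : List (List Int)) (S : PySem.Set Int) (loser : Int) :
    pvAdvance loser (PySem.Set.discard S loser)
        ((ballots.map (pvSkipInactive S)).filter (fun r => !r.isEmpty))
      = (ballots.map (pvSkipInactive (PySem.Set.discard S loser))).filter (fun r => !r.isEmpty) := by
  unfold pvAdvance
  set step := fun r : List Int =>
    if r.headD 0 == loser then pvSkipInactive (PySem.Set.discard S loser) (r.drop 1) else r
    with hstep
  have hstep0 : step [] = [] := by
    rw [hstep]
    cases h0 : ((0 : Int) == loser) <;> simp [pvSkipInactive]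
  rw [PySem.List.foldl_append_if (p := fun r => !(step r).isEmpty) (f := step)]
  have hmap : ballots.map (pvSkipInactive (PySem.Set.discard S loser))
      = (ballots.map (pvSkipInactive S)).map step := by
    rw [List.map_map]
    apply List.map_congr_left
    intro b _
    simp only [Function.comp]
    rw [hstep]
    exact pvSkip_discard S loser b
  rw [hmap]
  have := pvFilter_map_filter step hstep0 (ballots.map (pvSkipInactive S))
  simpa using this

theorem pvLen_pos_ne_nil {S : PySem.Set Int} (h : 1 < PySem.Set.len S) : S ≠ [] := by
  intro hS
  rw [hS] at h
  simp [PySem.Set.len] at h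

theorem pvLoop_eq (ballots : List (List Int)) :
    ∀ (fuel : Nat) (S : PySem.Set Int) (elim : List Int), S.Nodup →
      pvLoopA ballots fuel S elim
        = pvLoopB fuel S ((ballots.map (pvSkipInactive S)).filter (fun r => !r.isEmpty)) elim := by
  intro fuel
  induction fuel with
  | zero => intro S elim _; rfl
  | succ fuel ih =>
    intro S elim hS
    rw [pvLoopA, pvLoopB]
    by_cases h : 1 < PySem.Set.len S
    · rw [if_pos h, if_pos h]
      have hne : S ≠ [] := pvLen_pos_ne_nil h
      have hkey : (fun c => (pvCountsB ((ballots.map (pvSkipInactive S)).filter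
            (fun r => !r.isEmpty))).getD c 0) = pvTally ballots S := by
        funext c
        rw [pvCountsB_getD, pvTally_eq_heads]
      have hB : pvIsLexMin S (pvTally ballots S)
          (pvLoserB S ((ballots.map (pvSkipInactive S)).filter (fun r => !r.isEmpty))) := by
        unfold pvLoserB
        rw [hkey]
        exact pvMin2_isLexMin S (pvTally ballots S) hne
      have hloser : pvLoserB S ((ballots.map (pvSkipInactive S)).filter (fun r => !r.isEmpty))
          = pvRoundA ballots S :=
        pvIsLexMin_unique hB (pvRoundA_isLexMin ballots S hS hne)
      rw [hloser, pvRests_step ballots S (pvRoundA ballots S)]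
      exact ih (PySem.Set.discard S (pvRoundA ballots S)) (elim ++ [pvRoundA ballots S])
        (List.Nodup.filter _ hS)
    · rw [if_neg h, if_neg h]

-- ===== VERDICT (by name: the statement is the Claim_ definition above) =====
theorem irv_elimination_order_py_spec : Claim_equal_irv_elimination_order_py := by
  intro ballots candidate_ids _ _
  unfold Spec_irv_elimination_order_py
  unfold irv_elimination_order_py irv_elimination_order_py_alt
  rw [pvInitRests_eq,
    ← pvLoop_eq ballots _ _ _ (PySem.Set.nodup_ofList candidate_ids)]
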